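-- pv_equiv track=rewrite | github.com/rlipac31/sentiment-api-docker | API-dataScience/nlp_utils.py | contraste_con_negativo
-- ===== SOURCE A (Python) =====
-- def contraste_con_negativo(texto: str) -> bool:
--     conectores = ["pero", "aunque", "sin embargo"]
--     negativos = [
--         "precio_es_excesivo",
--         "muy_caro",
--         "precio_elevado",
--         "fallo",
--         "errores",
--         "no_volveria_a_comprar",
--         "calidad_es_muy_baja"
--     ]
--     for c in conectores:
--         if c in texto:
--             despues = texto.split(c, 1)[1]
--             if any(n in despues for n in negativos):
--                 return True
--     return False
-- ===== SOURCE B (Python) =====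
-- def contraste_con_negativo(texto: str) -> bool:
--     conectores = ["pero", "aunque", "sin embargo"]
--     negativos = [
--         "precio_es_excesivo",
--         "muy_caro",
--         "precio_elevado",
--         "fallo",
--         "errores",
--         "no_volveria_a_comprar",
--         "calidad_es_muy_baja"
--     ]
--     ends = [texto.find(c) + len(c) for c in conectores if c in texto]
--     if not ends:
--         return False
--     tail = texto[min(ends):]
--     return any(n in tail for n in negativos)
-- ===== Notes on version B (the rewrite author's own statement) =====
-- stated objective: alternative
-- what changed: Instead of splitting the text once per connector and scanning each suffix for the negative markers, B computes the earliest connector end boundary (minimum of find(c)+len(c) over present connectors) and scans the single largest suffix once for the markers.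
import Mathlib
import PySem

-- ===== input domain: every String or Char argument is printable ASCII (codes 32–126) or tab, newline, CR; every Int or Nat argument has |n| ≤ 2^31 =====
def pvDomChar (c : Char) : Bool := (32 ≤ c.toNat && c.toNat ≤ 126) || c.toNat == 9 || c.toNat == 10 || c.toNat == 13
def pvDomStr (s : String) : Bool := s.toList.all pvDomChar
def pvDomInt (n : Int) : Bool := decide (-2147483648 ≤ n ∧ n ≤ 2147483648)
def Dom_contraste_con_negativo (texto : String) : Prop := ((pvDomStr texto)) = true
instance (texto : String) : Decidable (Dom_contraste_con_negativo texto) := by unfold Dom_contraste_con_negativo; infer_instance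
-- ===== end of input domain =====

-- B replaces A's per-connector split-and-scan with one computation of the earliest
-- connector end boundary followed by a single scan of that largest suffix (objective: alternative).

-- ===== PORT A =====
-- the two literal constant lists of the Python source (shared verbatim by both ports)
def pvConectores : List String := ["pero", "aunque", "sin embargo"]
def pvNegativos : List String :=
  ["precio_es_excesivo", "muy_caro", "precio_elevado", "fallo", "errores",
   "no_volveria_a_comprar", "calidad_es_muy_baja"]

-- the 'for c in conectores' loop with its early 'return True'
def pvALoop (texto : String) : List String → Bool
  | [] => false
  | c :: rest =>
    if PySem.Str.isIn c texto then
      -- despues = texto.split(c, 1)[1], inlined: the split succeeds (c ≠ "") and index 1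
      -- exists because c occurs in texto, so the in-range indexing is List.getD 1 with a dummy default
      if pvNegativos.any (fun n =>
          PySem.Str.isIn n (((PySem.Str.splitMax? texto c 1).getD []).getD 1 "")) then true
      else pvALoop texto rest
    else pvALoop texto rest

def contraste_con_negativo (texto : String) : Bool := pvALoop texto pvConectores

-- ===== PORT B =====
def contraste_con_negativo_alt (texto : String) : Bool :=
  let ends := (pvConectores.filter (fun c => PySem.Str.isIn c texto)).map
      (fun c => PySem.Str.find texto c + PySem.Str.len c)
  match PySem.List.min? ends (fun e => e) with
  | none => false         -- 'if not ends: return False'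
  | some m =>
    let tail := PySem.Str.slice texto (some m) none
    pvNegativos.any (fun n => PySem.Str.isIn n tail)

-- ===== PRECONDITION & SPEC =====
def Spec_contraste_con_negativo (texto : String) (out : Bool) : Prop := out = contraste_con_negativo_alt texto
instance (texto : String) (out : Bool) : Decidable (Spec_contraste_con_negativo texto out) := by unfold Spec_contraste_con_negativo; infer_instance

-- ===== CLAIM (what is proved, stated in full; the proofs are below) =====
def Claim_equal_contraste_con_negativo : Prop := ∀ (texto : String), Dom_contraste_con_negativo texto → Spec_contraste_con_negativo texto (contraste_con_negativo texto)

-- ===== LEMMAS AND PROOFS =====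

-- end boundary of the first occurrence of connector c in s (a natural number)
def pvEnd (s c : List Char) : Nat := (PySem.Chars.find s c).toNat + c.length

-- "connector c is present and some negative marker occurs after its first occurrence"
def pvP (texto c : String) : Prop :=
  PySem.Str.isIn c texto = true ∧
    pvNegativos.any
      (fun n => PySem.Chars.isIn n.toList (texto.toList.drop (pvEnd texto.toList c.toList))) = true

-- a marker found after a later cut is found after an earlier cut
lemma pvMono (s n : List Char) (a b : Nat) (hab : a ≤ b)
    (h : PySem.Chars.isIn n (s.drop b) = true) : PySem.Chars.isIn n (s.drop a) = true := by
  rw [PySem.Chars.isIn_iff_infix] at h ⊢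
  have hd : s.drop b = (s.drop a).drop (b - a) := by
    rw [List.drop_drop]; congr 1; omega
  exact h.trans (hd ▸ (List.drop_suffix (b - a) (s.drop a)).isInfix)

lemma pvGoZero (sep : List Char) (fuel : Nat) (l cur : List Char) (acc : List (List Char)) :
    PySem.Chars.splitOnMax.go sep fuel 0 l cur acc = ((cur.reverse ++ l) :: acc).reverse := by
  cases fuel with
  | zero => simp [PySem.Chars.splitOnMax.go]
  | succ f => cases l with
    | nil => simp [PySem.Chars.splitOnMax.go]
    | cons c rest => simp [PySem.Chars.splitOnMax.go]

lemma pvGoOne (sep : List Char) (hsep : sep ≠ []) :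
    ∀ (l : List Char) (j fuel : Nat) (cur : List Char),
      l.length < fuel → sep <+: l.drop j → (∀ i, i < j → ¬ sep <+: l.drop i) →
      PySem.Chars.splitOnMax.go sep fuel 1 l cur [] =
        [cur.reverse ++ l.take j, l.drop (j + sep.length)] := by
  intro l
  induction l with
  | nil =>
    intro j fuel cur _ hpre _
    simp at hpre
    exact absurd hpre hsep
  | cons c rest ih =>
    intro j fuel cur hfuel hpre hmin
    cases fuel with
    | zero => omega
    | succ f =>
      by_cases hp : sep <+: (c :: rest)
      · have hj0 : j = 0 := by
          by_contra hne
          exact hmin 0 (by omega) hp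
        subst hj0
        simp only [PySem.Chars.splitOnMax.go, List.isPrefixOf_iff_prefix.mpr hp]
        simp [pvGoZero]
      · have hj : j ≠ 0 := by
          rintro rfl; exact hp hpre
        obtain ⟨j', rfl⟩ : ∃ j', j = j' + 1 := ⟨j - 1, by omega⟩
        have hstep : PySem.Chars.splitOnMax.go sep (f + 1) 1 (c :: rest) cur [] =
            PySem.Chars.splitOnMax.go sep f 1 rest (c :: cur) [] := by
          have hpb : sep.isPrefixOf (c :: rest) = false := by
            rw [Bool.eq_false_iff]
            intro hb; exact hp (List.isPrefixOf_iff_prefix.mp hb)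
          simp [PySem.Chars.splitOnMax.go, hpb]
        rw [hstep, ih j' f (c :: cur) (by simpa using Nat.lt_of_succ_lt_succ hfuel)
          (by simpa using hpre)
          (fun i hi => by simpa using hmin (i + 1) (by omega))]
        have h2 : j' + 1 + sep.length = (j' + sep.length) + 1 := by omega
        simp [h2]

-- texto.split(c, 1) for a present, nonempty separator
lemma pvSplitEq (s sep : List Char) (hsep : sep ≠ []) (hin : PySem.Chars.isIn sep s = true) :
    PySem.Chars.splitOnMax s sep 1 =
      [s.take ((PySem.Chars.find s sep).toNat),
       s.drop ((PySem.Chars.find s sep).toNat + sep.length)] := by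
  have hinf : sep <:+: s := (PySem.Chars.isIn_iff_infix sep s).mp hin
  have hne : PySem.Chars.findFrom s sep ((0 : Nat) : Int) ≠ -1 := by
    simp only [Nat.cast_zero, PySem.Chars.findFrom_zero]
    intro h
    exact (PySem.Chars.find_eq_neg_one_iff s sep).mp h hinf
  obtain ⟨-, hpre, hmin⟩ := PySem.Chars.findFrom_natCast_spec s sep 0 (Nat.zero_le _) hne
  simp only [Nat.cast_zero, PySem.Chars.findFrom_zero] at hpre hmin
  have h1 : PySem.Chars.splitOnMax s sep 1 = PySem.Chars.splitOnMax.go sep (s.length + 1) 1 s [] [] := by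
    simp [PySem.Chars.splitOnMax]
  rw [h1, pvGoOne sep hsep s (PySem.Chars.find s sep).toNat (s.length + 1) []
    (by omega) hpre (fun i hi => hmin i (Nat.zero_le _) hi)]
  simp

-- the body of A's loop for one present connector, at the String level
lemma pvDespues (texto c : String) (hc : c.toList ≠ []) (hin : PySem.Str.isIn c texto = true) :
    ((PySem.Str.splitMax? texto c 1).getD []).getD 1 "" =
      String.ofList (texto.toList.drop (pvEnd texto.toList c.toList)) := by
  have hin' : PySem.Chars.isIn c.toList texto.toList = true := hin
  rw [PySem.Str.splitMax?]
  rw [PySem.Chars.splitMax?]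
  simp only [List.isEmpty_iff, hc, if_false]
  rw [pvSplitEq texto.toList c.toList hc hin']
  simp [pvEnd]

lemma pvAnyOfList (l : List Char) :
    pvNegativos.any (fun n => PySem.Str.isIn n (String.ofList l)) =
      pvNegativos.any (fun n => PySem.Chars.isIn n.toList l) := by
  simp [PySem.Str.isIn, String.toList_ofList]

lemma pvALoop_cons (texto c : String) (rest : List String) :
    pvALoop texto (c :: rest) =
      if PySem.Str.isIn c texto then
        (if pvNegativos.any (fun n =>
            PySem.Str.isIn n (((PySem.Str.splitMax? texto c 1).getD []).getD 1 "")) then true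
         else pvALoop texto rest)
      else pvALoop texto rest := rfl

lemma pvALoop_iff (texto : String) (cs : List String) (hne : ∀ c ∈ cs, c.toList ≠ []) :
    pvALoop texto cs = true ↔ ∃ c ∈ cs, pvP texto c := by
  induction cs with
  | nil => simp [pvALoop]
  | cons c rest ih =>
    have hrest := ih (fun d hd => hne d (List.mem_cons_of_mem c hd))
    by_cases hin : PySem.Str.isIn c texto = true
    · rw [pvALoop_cons, if_pos hin, pvDespues texto c (hne c List.mem_cons_self) hin, pvAnyOfList]
      by_cases hany : pvNegativos.any
          (fun n => PySem.Chars.isIn n.toList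
            (texto.toList.drop (pvEnd texto.toList c.toList))) = true
      · rw [if_pos hany]
        simp only [true_iff]
        exact ⟨c, List.mem_cons_self, hin, hany⟩
      · rw [if_neg hany, hrest]
        constructor
        · rintro ⟨d, hd, hPd⟩; exact ⟨d, List.mem_cons_of_mem c hd, hPd⟩
        · rintro ⟨d, hd, hPd⟩
          rcases List.mem_cons.mp hd with rfl | hd'
          · exact absurd hPd.2 hany
          · exact ⟨d, hd', hPd⟩
    · rw [pvALoop_cons, if_neg hin, hrest]
      constructor
      · rintro ⟨d, hd, hPd⟩; exact ⟨d, List.mem_cons_of_mem c hd, hPd⟩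
      · rintro ⟨d, hd, hPd⟩
        rcases List.mem_cons.mp hd with rfl | hd'
        · exact absurd hPd.1 hin
        · exact ⟨d, hd', hPd⟩

-- each entry of B's 'ends' list is the natural end boundary of a present connector
lemma pvEndCast (texto c : String) (hin : PySem.Str.isIn c texto = true) :
    PySem.Str.find texto c + PySem.Str.len c = ((pvEnd texto.toList c.toList : Nat) : Int) := by
  have h0 : 0 ≤ PySem.Chars.find texto.toList c.toList :=
    (PySem.Chars.find_nonneg_iff texto.toList c.toList).mpr
      ((PySem.Chars.isIn_iff_infix c.toList texto.toList).mp hin)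
  simp only [PySem.Str.find, PySem.Str.len, pvEnd]
  push_cast [Int.toNat_of_nonneg h0]
  ring

def pvEnds (texto : String) : List Int :=
  (pvConectores.filter (fun c => PySem.Str.isIn c texto)).map
    (fun c => PySem.Str.find texto c + PySem.Str.len c)

lemma pvBalt_eq (texto : String) :
    contraste_con_negativo_alt texto =
      match PySem.List.min? (pvEnds texto) (fun e => e) with
      | none => false
      | some m =>
        pvNegativos.any (fun n => PySem.Str.isIn n (PySem.Str.slice texto (some m) none)) := rfl

lemma pvSliceIsIn (texto n : String) (e : Nat) :
    PySem.Str.isIn n (PySem.Str.slice texto (some ((e : Nat) : Int)) none) =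
      PySem.Chars.isIn n.toList (texto.toList.drop e) := by
  simp [PySem.Str.isIn, PySem.Str.slice, String.toList_ofList,
    PySem.Chars.slice_eq_listSlice, PySem.List.slice_from_natCast]

lemma pvBalt_iff (texto : String) :
    contraste_con_negativo_alt texto = true ↔ ∃ c ∈ pvConectores, pvP texto c := by
  rw [pvBalt_eq]
  rcases hm : PySem.List.min? (pvEnds texto) (fun e => e) with - | m
  · simp only [Bool.false_eq_true, false_iff]
    rintro ⟨c, hccs, hcin, -⟩
    rw [PySem.List.min?_eq_none_iff] at hm
    have hmem : ((pvEnd texto.toList c.toList : Nat) : Int) ∈ pvEnds texto :=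
      List.mem_map.mpr ⟨c, List.mem_filter.mpr ⟨hccs, hcin⟩, pvEndCast texto c hcin⟩
    rw [hm] at hmem
    simp at hmem
  · simp only
    obtain ⟨c0, hc0mem, hc0e⟩ := List.mem_map.mp (PySem.List.min?_mem hm)
    have hc0in : PySem.Str.isIn c0 texto = true := (List.mem_filter.mp hc0mem).2
    have hc0cs : c0 ∈ pvConectores := (List.mem_filter.mp hc0mem).1
    have hmval : m = ((pvEnd texto.toList c0.toList : Nat) : Int) := by
      rw [← hc0e, pvEndCast texto c0 hc0in]
    constructor
    · intro hB
      refine ⟨c0, hc0cs, hc0in, ?_⟩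
      rw [List.any_eq_true] at hB ⊢
      obtain ⟨n, hnmem, hn⟩ := hB
      rw [hmval, pvSliceIsIn] at hn
      exact ⟨n, hnmem, hn⟩
    · rintro ⟨c, hccs, hcin, hany⟩
      have hmem : ((pvEnd texto.toList c.toList : Nat) : Int) ∈ pvEnds texto :=
        List.mem_map.mpr ⟨c, List.mem_filter.mpr ⟨hccs, hcin⟩, pvEndCast texto c hcin⟩
      have hle : pvEnd texto.toList c0.toList ≤ pvEnd texto.toList c.toList := by
        have := PySem.List.min?_isMin hm _ hmem
        simp only [hmval] at this
        exact_mod_cast this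
      rw [List.any_eq_true] at hany ⊢
      obtain ⟨n, hnmem, hn⟩ := hany
      refine ⟨n, hnmem, ?_⟩
      rw [hmval, pvSliceIsIn]
      exact pvMono texto.toList n.toList _ _ hle hn

-- ===== VERDICT (by name: the statement is the Claim_ definition above) =====
theorem contraste_con_negativo_spec : Claim_equal_contraste_con_negativo := by
  intro texto _
  unfold Spec_contraste_con_negativo contraste_con_negativo
  rw [Bool.eq_iff_iff, pvBalt_iff,
    pvALoop_iff texto pvConectores (by intro c hc; fin_cases hc <;> simp)]
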